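-- pv_equiv track=rewrite | github.com/Qandra-Si/q.industrialist | render_html_conveyor.py | get_stock_resources
-- ===== SOURCE A (Python) =====
-- def get_stock_resources(stock_loc_ids, corp_ass_loc_data):
--     stock_resources = {}
--     if not (stock_loc_ids is None):
--         for loc_id in stock_loc_ids:
--             loc_flags = corp_ass_loc_data.keys()
--             for loc_flag in loc_flags:
--                 __a1 = corp_ass_loc_data[loc_flag]
--                 if str(loc_id) in __a1:
--                     __a2 = __a1[str(loc_id)]
--                     for itm in __a2:
--                         if str(itm) in stock_resources:
--                             stock_resources[itm] = stock_resources[itm] + __a2[itm]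
--                         else:
--                             stock_resources.update({itm: __a2[itm]})
--     return stock_resources
-- ===== SOURCE B (Python) =====
-- def get_stock_resources(stock_loc_ids, corp_ass_loc_data):
--     # Build a reverse index loc_id_str -> list of item sub-dicts once, then aggregate per requested id.
--     if stock_loc_ids is None:
--         return {}
--     index = {}
--     for inner in corp_ass_loc_data.values():
--         for loc_id_str, sub in inner.items():
--             index.setdefault(loc_id_str, []).append(sub)
--     stock_resources = {}
--     for loc_id in stock_loc_ids:
--         for sub in index.get(str(loc_id), []):
--             for itm, qty in sub.items():
--                 stock_resources[itm] = stock_resources.get(itm, 0) + qty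
--     return stock_resources
-- ===== Notes on version B (the rewrite author's own statement) =====
-- stated objective: faster
-- what changed: Instead of rescanning every location-flag dict for every stock id (str(loc_id) membership test per flag), B builds a reverse index from loc_id string to the list of item sub-dicts in one pass and then aggregates each requested id from its bucket directly.
import Mathlib
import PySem

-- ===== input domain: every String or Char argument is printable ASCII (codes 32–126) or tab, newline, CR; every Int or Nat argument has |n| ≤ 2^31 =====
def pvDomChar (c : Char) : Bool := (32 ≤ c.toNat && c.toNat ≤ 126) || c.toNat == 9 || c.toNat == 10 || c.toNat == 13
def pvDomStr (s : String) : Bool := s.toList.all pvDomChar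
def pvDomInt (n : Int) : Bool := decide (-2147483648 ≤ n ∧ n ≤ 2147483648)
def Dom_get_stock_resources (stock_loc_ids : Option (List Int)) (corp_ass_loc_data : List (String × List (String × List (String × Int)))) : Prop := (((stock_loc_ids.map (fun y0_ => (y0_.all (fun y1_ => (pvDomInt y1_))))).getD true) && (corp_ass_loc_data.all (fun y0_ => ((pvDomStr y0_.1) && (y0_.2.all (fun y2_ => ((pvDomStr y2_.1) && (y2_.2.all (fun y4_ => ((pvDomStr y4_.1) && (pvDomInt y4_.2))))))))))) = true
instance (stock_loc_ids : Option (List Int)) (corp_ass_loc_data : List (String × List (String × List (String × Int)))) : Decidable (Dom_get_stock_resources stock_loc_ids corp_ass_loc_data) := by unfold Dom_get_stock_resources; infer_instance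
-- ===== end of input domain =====

-- B replaces A's rescan of every location flag for every stock id by a reverse index
-- (loc_id string -> list of item sub-dicts) built once; same aggregation, same result order.

-- ===== PORT A =====
def get_stock_resources (stock_loc_ids : Option (List Int)) (corp_ass_loc_data : List (String × List (String × List (String × Int)))) : List (String × Int) :=
  let cd : PySem.Dict String (List (String × List (String × Int))) := PySem.Dict.ofList corp_ass_loc_data
  let stock_resources : PySem.Dict String Int := PySem.Dict.empty
  let stock_resources :=
    match stock_loc_ids with
    | none => stock_resources
    | some ids =>
      ids.foldl (fun sr loc_id =>
        let loc_flags := cd.keys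
        loc_flags.foldl (fun sr loc_flag =>
          let a1 := PySem.Dict.ofList (cd.getD loc_flag [])
          if a1.contains (PySem.Int.toStr loc_id) then
            let a2 := PySem.Dict.ofList (a1.getD (PySem.Int.toStr loc_id) [])
            a2.keys.foldl (fun sr itm =>
              if sr.contains itm then sr.insert itm (sr.getD itm 0 + a2.getD itm 0)
              else sr.insert itm (a2.getD itm 0)) sr
          else sr) sr) stock_resources
  stock_resources.items

-- ===== PORT B =====
def get_stock_resources_alt (stock_loc_ids : Option (List Int)) (corp_ass_loc_data : List (String × List (String × List (String × Int)))) : List (String × Int) :=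
  match stock_loc_ids with
  | none => []
  | some ids =>
    let cd : PySem.Dict String (List (String × List (String × Int))) := PySem.Dict.ofList corp_ass_loc_data
    let index : PySem.Dict String (List (List (String × Int))) :=
      cd.values.foldl (fun ix inner =>
        (PySem.Dict.ofList inner).items.foldl (fun ix p => ix.modify p.1 [] (· ++ [p.2])) ix)
        PySem.Dict.empty
    (ids.foldl (fun (sr : PySem.Dict String Int) loc_id =>
      (index.getD (PySem.Int.toStr loc_id) []).foldl (fun sr sub =>
        (PySem.Dict.ofList sub).items.foldl (fun sr p =>
          sr.insert p.1 (sr.getD p.1 0 + p.2)) sr) sr)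
      PySem.Dict.empty).items

-- ===== PRECONDITION & SPEC =====
def Spec_get_stock_resources (stock_loc_ids : Option (List Int)) (corp_ass_loc_data : List (String × List (String × List (String × Int)))) (out : List (String × Int)) : Prop := out = get_stock_resources_alt stock_loc_ids corp_ass_loc_data
instance (stock_loc_ids : Option (List Int)) (corp_ass_loc_data : List (String × List (String × List (String × Int)))) (out : List (String × Int)) : Decidable (Spec_get_stock_resources stock_loc_ids corp_ass_loc_data out) := by unfold Spec_get_stock_resources; infer_instance

-- ===== CLAIM (what is proved, stated in full; the proofs are below) =====
def Claim_equal_get_stock_resources : Prop := ∀ (stock_loc_ids : Option (List Int)) (corp_ass_loc_data : List (String × List (String × List (String × Int)))), Dom_get_stock_resources stock_loc_ids corp_ass_loc_data → Spec_get_stock_resources stock_loc_ids corp_ass_loc_data (get_stock_resources stock_loc_ids corp_ass_loc_data)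

-- ===== LEMMAS AND PROOFS =====

-- B's per-pair aggregation step.
def pvAgg (sr : PySem.Dict String Int) (p : String × Int) : PySem.Dict String Int :=
  sr.insert p.1 (sr.getD p.1 0 + p.2)

-- A's key-loop over a nodup-keyed dict is B's items-loop.
theorem pvInnerFold (a2 : PySem.Dict String Int) (h : a2.keys.Nodup) (sr : PySem.Dict String Int) :
    a2.keys.foldl (fun sr itm =>
      if sr.contains itm then sr.insert itm (sr.getD itm 0 + a2.getD itm 0)
      else sr.insert itm (a2.getD itm 0)) sr
    = a2.items.foldl pvAgg sr := by
  rw [PySem.Dict.items_eq_map_keys a2 h 0, List.foldl_map]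
  have hstep : (fun (sr : PySem.Dict String Int) itm =>
      if sr.contains itm then sr.insert itm (sr.getD itm 0 + a2.getD itm 0)
      else sr.insert itm (a2.getD itm 0))
      = fun sr k => pvAgg sr (k, a2.getD k 0) := by
    funext sr k
    by_cases hc : sr.contains k = true
    · simp [hc, pvAgg]
    · simp only [Bool.not_eq_true] at hc
      simp [hc, pvAgg, PySem.Dict.getD_of_not_contains sr 0 hc]
  rw [hstep]

-- the values of a nodup-keyed dict carrying key s, as a filter of its items
theorem pvFilterSingle (l : List (String × List (String × Int))) (h : (l.map Prod.fst).Nodup) (s : String) :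
    ((l.filter (fun p => p.1 == s)).map Prod.snd)
    = (if (PySem.Dict.mk l).contains s then [(PySem.Dict.mk l).getD s []] else []) := by
  induction l with
  | nil => simp [PySem.Dict.contains_mk]
  | cons hd tl ih =>
    obtain ⟨k0, v0⟩ := hd
    simp only [List.map_cons, List.nodup_cons] at h
    by_cases hk : k0 = s
    · have htl : tl.filter (fun p => p.1 == s) = [] := by
        apply List.filter_eq_nil_iff.mpr
        intro p hp hps
        exact h.1 (hk ▸ (by simpa using hps) ▸ List.mem_map_of_mem hp)
      simp [hk, htl, PySem.Dict.contains_mk,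
        PySem.Dict.getD_eq_get?_getD, PySem.Dict.get?_mk_cons]
    · have hne : (k0 == s) = false := by simp [hk]
      simp only [List.filter_cons, hne, Bool.false_eq_true, if_false]
      rw [ih h.2]
      simp [PySem.Dict.contains_mk, hne, PySem.Dict.getD_eq_get?_getD, PySem.Dict.get?_mk_cons]
      simp only [hne, Bool.false_or]
      split <;> rfl

-- what B's reverse index holds at key s
theorem pvIndexGetD (cd : PySem.Dict String (List (String × List (String × Int)))) (s : String) :
    (cd.values.foldl (fun ix inner =>
        (PySem.Dict.ofList inner).items.foldl (fun ix p => ix.modify p.1 [] (· ++ [p.2])) ix)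
        PySem.Dict.empty).getD s []
    = cd.values.flatMap (fun inner =>
        (((PySem.Dict.ofList inner).items.filter (fun p => p.1 == s)).map Prod.snd)) := by
  rw [← List.foldl_flatMap, PySem.Dict.getD_foldl_modify_append]
  simp [List.filter_flatMap, List.map_flatMap]

-- per-stock-id: A's scan over all flags = B's walk of the index bucket
theorem pvLocStep (cd : PySem.Dict String (List (String × List (String × Int))))
    (hnd : cd.keys.Nodup) (s : String) (sr : PySem.Dict String Int) :
    cd.keys.foldl (fun sr loc_flag =>
      let a1 := PySem.Dict.ofList (cd.getD loc_flag [])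
      if a1.contains s then
        let a2 := PySem.Dict.ofList (a1.getD s [])
        a2.keys.foldl (fun sr itm =>
          if sr.contains itm then sr.insert itm (sr.getD itm 0 + a2.getD itm 0)
          else sr.insert itm (a2.getD itm 0)) sr
      else sr) sr
    = ((cd.values.foldl (fun ix inner =>
          (PySem.Dict.ofList inner).items.foldl (fun ix p => ix.modify p.1 [] (· ++ [p.2])) ix)
          PySem.Dict.empty).getD s []).foldl
        (fun sr sub => (PySem.Dict.ofList sub).items.foldl (fun sr p =>
          sr.insert p.1 (sr.getD p.1 0 + p.2)) sr) sr := by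
  rw [pvIndexGetD, PySem.Dict.values_eq_map_keys cd hnd [], List.flatMap_map, List.foldl_flatMap]
  have hstep : ∀ (sr : PySem.Dict String Int) (k : String),
      (let a1 := PySem.Dict.ofList (cd.getD k [])
       if a1.contains s then
         let a2 := PySem.Dict.ofList (a1.getD s [])
         a2.keys.foldl (fun sr itm =>
           if sr.contains itm then sr.insert itm (sr.getD itm 0 + a2.getD itm 0)
           else sr.insert itm (a2.getD itm 0)) sr
       else sr)
      = (((PySem.Dict.ofList (cd.getD k [])).items.filter (fun p => p.1 == s)).map Prod.snd).foldl
          (fun sr sub => (PySem.Dict.ofList sub).items.foldl (fun sr p =>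
            sr.insert p.1 (sr.getD p.1 0 + p.2)) sr) sr := by
    intro sr k
    have hnd1 : ((PySem.Dict.ofList (cd.getD k [])).items.map Prod.fst).Nodup :=
      PySem.Dict.nodup_keys_ofList (cd.getD k [])
    have := pvFilterSingle ((PySem.Dict.ofList (cd.getD k [])).items) hnd1 s
    rw [show PySem.Dict.mk ((PySem.Dict.ofList (cd.getD k [])).items) = PySem.Dict.ofList (cd.getD k []) from rfl] at this
    rw [this]
    by_cases hc : (PySem.Dict.ofList (cd.getD k [])).contains s = true
    · simp only [hc, if_true, List.foldl_cons, List.foldl_nil]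
      exact pvInnerFold _ (PySem.Dict.nodup_keys_ofList _) sr
    · simp only [Bool.not_eq_true] at hc
      simp [hc]
  exact PySem.List.foldl_congr_mem _ _ _ _ (fun sr k _ => hstep sr k)

-- ===== VERDICT (by name: the statement is the Claim_ definition above) =====
theorem get_stock_resources_spec : Claim_equal_get_stock_resources := by
  intro stock_loc_ids corp_ass_loc_data _
  unfold Spec_get_stock_resources get_stock_resources get_stock_resources_alt
  cases stock_loc_ids with
  | none => rfl
  | some ids =>
    simp only
    congr 1
    exact PySem.List.foldl_congr_mem _ _ _ _ (fun sr loc_id _ =>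
      pvLocStep (PySem.Dict.ofList corp_ass_loc_data)
        (PySem.Dict.nodup_keys_ofList corp_ass_loc_data) (PySem.Int.toStr loc_id) sr)
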